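-- pv_equiv track=rewrite | github.com/lucianafb/sp-pipeline | sps_pipeline_santi/src/processing/evidence.py | classify_evidence
-- ===== SOURCE A (Python) =====
-- ECO_CATEGORIES = {
--     # Evidencia experimental directa
--     "ECO:0000269": "EXPERIMENTAL",    # Experimental - manual assertion
--     "ECO:0000303": "EXPERIMENTAL",    # Non-traceable author statement (published)
--     "ECO:0000305": "EXPERIMENTAL",    # Curator inference
--
--     # Inferencia por similitud
--     "ECO:0000250": "BY_SIMILARITY",   # Sequence similarity
--     "ECO:0000255": "BY_SIMILARITY",   # Sequence model (PROSITE, Pfam rules)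
--
--     # Predicción automática
--     "ECO:0000256": "PREDICTED",       # Automatic annotation (SAM, etc.)
--     "ECO:0007829": "PREDICTED",       # Automatic assertion (evidence used in manual)
--     "ECO:0000259": "PREDICTED",       # Automatic annotation by PROSITE
--     "ECO:0000312": "PREDICTED",       # Imported from another database
-- }
--
-- EVIDENCE_PRIORITY = {
--     "EXPERIMENTAL": 0,
--     "BY_SIMILARITY": 1,
--     "PREDICTED": 2,
--     "PREDICTED (No Evidence)": 3,
-- }
--
-- def classify_evidence(feature: dict) -> tuple[str, list[str]]:
--     """
--     Clasifica la evidencia de un feature de UniProt.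
--
--     Args:
--         feature: Dict de un feature de UniProt (JSON).
--
--     Returns:
--         Tuple de (categoría, lista_de_codigos_ECO).
--         Categoría: "EXPERIMENTAL", "BY_SIMILARITY", "PREDICTED", o "PREDICTED (No Evidence)".
--     """
--     evidences = feature.get("evidences", [])
--
--     if not evidences:
--         return "PREDICTED (No Evidence)", []
--
--     eco_codes = []
--     best_category = "PREDICTED"
--
--     for ev in evidences:
--         code = ev.get("evidenceCode", "")
--         if code:
--             eco_codes.append(code)
--
--         category = ECO_CATEGORIES.get(code, "PREDICTED")
--         # Quedarse con la mejor categoría encontrada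
--         if EVIDENCE_PRIORITY.get(category, 99) < EVIDENCE_PRIORITY.get(best_category, 99):
--             best_category = category
--
--     return best_category, eco_codes
-- ===== SOURCE B (Python) =====
-- # Decide the category by presence of experimental / similarity ECO codes
-- # instead of minimising a priority rank.
-- EXPERIMENTAL_CODES = {"ECO:0000269", "ECO:0000303", "ECO:0000305"}
-- SIMILARITY_CODES = {"ECO:0000250", "ECO:0000255"}
--
-- def classify_evidence(feature: dict) -> tuple[str, list[str]]:
--     evidences = feature.get("evidences", [])
--     if not evidences:
--         return "PREDICTED (No Evidence)", []
--     eco_codes = [c for c in (ev.get("evidenceCode", "") for ev in evidences) if c]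
--     if any(c in EXPERIMENTAL_CODES for c in eco_codes):
--         best = "EXPERIMENTAL"
--     elif any(c in SIMILARITY_CODES for c in eco_codes):
--         best = "BY_SIMILARITY"
--     else:
--         best = "PREDICTED"
--     return best, eco_codes
-- ===== Notes on version B (the rewrite author's own statement) =====
-- stated objective: simpler
-- what changed: Drops the priority table and running-min entirely: the category is decided by two early-exit membership tests (any experimental code present, else any similarity code present, else PREDICTED) over the collected truthy codes.
import Mathlib
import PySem

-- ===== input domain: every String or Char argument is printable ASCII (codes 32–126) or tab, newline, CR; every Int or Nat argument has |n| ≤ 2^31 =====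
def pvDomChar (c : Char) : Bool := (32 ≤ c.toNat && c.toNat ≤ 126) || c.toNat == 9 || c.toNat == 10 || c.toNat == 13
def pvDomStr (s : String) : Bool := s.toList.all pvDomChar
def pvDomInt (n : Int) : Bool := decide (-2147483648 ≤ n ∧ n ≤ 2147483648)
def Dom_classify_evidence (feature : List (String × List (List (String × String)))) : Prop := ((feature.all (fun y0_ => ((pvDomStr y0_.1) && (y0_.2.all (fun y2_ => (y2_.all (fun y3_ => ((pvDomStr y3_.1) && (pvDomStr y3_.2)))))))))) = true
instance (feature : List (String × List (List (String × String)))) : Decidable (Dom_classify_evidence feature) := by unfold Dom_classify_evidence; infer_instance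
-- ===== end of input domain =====

-- B drops the priority table and running-min: the category is decided by two early-exit
-- membership tests over the collected truthy codes; objective: simpler.

-- the two module-level dict constants of the Python file (A's side)
def ecoCategories : PySem.Dict String String := ⟨[("ECO:0000269","EXPERIMENTAL"),("ECO:0000303","EXPERIMENTAL"),("ECO:0000305","EXPERIMENTAL"),("ECO:0000250","BY_SIMILARITY"),("ECO:0000255","BY_SIMILARITY"),("ECO:0000256","PREDICTED"),("ECO:0007829","PREDICTED"),("ECO:0000259","PREDICTED"),("ECO:0000312","PREDICTED")]⟩

def evidencePriority : PySem.Dict String Int := ⟨[("EXPERIMENTAL",0),("BY_SIMILARITY",1),("PREDICTED",2),("PREDICTED (No Evidence)",3)]⟩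

-- ===== PORT A =====
def classify_evidence (feature : List (String × List (List (String × String)))) : String × List String :=
  let evidences := PySem.Dict.getD ⟨feature⟩ "evidences" []
  if evidences = [] then ("PREDICTED (No Evidence)", [])
  else
    -- for ev in evidences: append truthy code, keep the strictly better category
    let r := evidences.foldl (fun (st : List String × String) ev =>
      let code := PySem.Dict.getD ⟨ev⟩ "evidenceCode" ""
      let eco_codes := if code ≠ "" then st.1 ++ [code] else st.1
      let category := PySem.Dict.getD ecoCategories code "PREDICTED"
      let best := if PySem.Dict.getD evidencePriority category 99 <
                     PySem.Dict.getD evidencePriority st.2 99 then category else st.2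
      (eco_codes, best)) ([], "PREDICTED")
    (r.2, r.1)

-- ===== PORT B =====
-- B's two module-level set constants (PySem.Set = distinct-element list)
def expCodes : PySem.Set String := PySem.Set.ofList ["ECO:0000269", "ECO:0000303", "ECO:0000305"]
def simCodes : PySem.Set String := PySem.Set.ofList ["ECO:0000250", "ECO:0000255"]

def classify_evidence_alt (feature : List (String × List (List (String × String)))) : String × List String :=
  let evidences := PySem.Dict.getD ⟨feature⟩ "evidences" []
  if evidences = [] then ("PREDICTED (No Evidence)", [])
  else
    let eco_codes := (evidences.map (fun ev => PySem.Dict.getD ⟨ev⟩ "evidenceCode" "")).filter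
      (fun c => c != "")
    let best :=
      if eco_codes.any (fun c => expCodes.contains c) then "EXPERIMENTAL"
      else if eco_codes.any (fun c => simCodes.contains c) then "BY_SIMILARITY"
      else "PREDICTED"
    (best, eco_codes)

-- ===== PRECONDITION & SPEC =====
def Spec_classify_evidence (feature : List (String × List (List (String × String)))) (out : String × List String) : Prop := out = classify_evidence_alt feature
instance (feature : List (String × List (List (String × String)))) (out : String × List String) : Decidable (Spec_classify_evidence feature out) := by unfold Spec_classify_evidence; infer_instance

-- ===== CLAIM (what is proved, stated in full; the proofs are below) =====
def Claim_equal_classify_evidence : Prop := ∀ (feature : List (String × List (List (String × String)))), Dom_classify_evidence feature → Spec_classify_evidence feature (classify_evidence feature)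

-- ===== LEMMAS AND PROOFS =====

-- abbreviations for the proofs (the ports inline these expressions)
def codeOf (ev : List (String × String)) : String := PySem.Dict.getD ⟨ev⟩ "evidenceCode" ""
def catOf (s : String) : String := PySem.Dict.getD ecoCategories s "PREDICTED"
def prioOf (c : String) : Int := PySem.Dict.getD evidencePriority c 99
def bstep (b c : String) : String := if prioOf c < prioOf b then c else b

-- A's loop, characterised: eco_codes is the filtered code list, best a bstep fold over categories
lemma foldA_char (evs : List (List (String × String))) (acc : List String) (b : String) :
    evs.foldl (fun (st : List String × String) ev =>
      let code := PySem.Dict.getD ⟨ev⟩ "evidenceCode" ""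
      let eco_codes := if code ≠ "" then st.1 ++ [code] else st.1
      let category := PySem.Dict.getD ecoCategories code "PREDICTED"
      let best := if PySem.Dict.getD evidencePriority category 99 <
                     PySem.Dict.getD evidencePriority st.2 99 then category else st.2
      (eco_codes, best)) (acc, b)
    = (acc ++ (evs.map codeOf).filter (fun c => c != ""),
       (evs.map (fun ev => catOf (codeOf ev))).foldl bstep b) := by
  induction evs generalizing acc b with
  | nil => simp
  | cons e t ih =>
    simp only [List.foldl_cons, List.map_cons, List.filter_cons, ih]
    by_cases h : PySem.Dict.getD (⟨e⟩ : PySem.Dict String String) "evidenceCode" "" = "" <;>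
      simp [h, codeOf, catOf, prioOf, bstep]

-- the ECO table, read through the two code sets
lemma catOf_eq (s : String) :
    catOf s = if expCodes.contains s then "EXPERIMENTAL"
      else if simCodes.contains s then "BY_SIMILARITY"
      else "PREDICTED" := by
  by_cases h1 : expCodes.contains s = true
  · have he : expCodes = ["ECO:0000269", "ECO:0000303", "ECO:0000305"] := by decide
    rw [he] at h1
    rw [PySem.Set.contains_eq_listContains, List.contains_eq_mem] at h1
    have : s = "ECO:0000269" ∨ s = "ECO:0000303" ∨ s = "ECO:0000305" := by
      simpa [eq_comm] using of_decide_eq_true h1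
    rcases this with e | e | e <;> subst e <;> decide
  · by_cases h2 : simCodes.contains s = true
    · have he : simCodes = ["ECO:0000250", "ECO:0000255"] := by decide
      rw [he] at h2
      rw [PySem.Set.contains_eq_listContains, List.contains_eq_mem] at h2
      have : s = "ECO:0000250" ∨ s = "ECO:0000255" := by
        simpa [eq_comm] using of_decide_eq_true h2
      rcases this with e | e <;> subst e <;> decide
    · rw [if_neg h1, if_neg h2]
      unfold catOf
      rcases h : List.find? (fun p => p.1 == s) ecoCategories.items with _ | pr
      · simp [PySem.Dict.getD, PySem.Dict.get?, h]
      · have hm := List.mem_of_find?_eq_some h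
        have hp := List.find?_some h
        fin_cases hm <;> (have hs := eq_of_beq hp; subst hs) <;>
          first
            | exact absurd (by decide) h1
            | exact absurd (by decide) h2
            | simp [PySem.Dict.getD, PySem.Dict.get?, h]

-- folds of bstep over categories, by starting state
lemma fold_from_E (cs : List String) :
    (cs.map catOf).foldl bstep "EXPERIMENTAL" = "EXPERIMENTAL" := by
  induction cs with
  | nil => rfl
  | cons c t ih =>
    have hstep : bstep "EXPERIMENTAL" (catOf c) = "EXPERIMENTAL" := by
      rw [catOf_eq]; split_ifs <;> decide
    rw [List.map_cons, List.foldl_cons, hstep]; exact ih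

lemma fold_from_B (cs : List String) :
    (cs.map catOf).foldl bstep "BY_SIMILARITY"
      = if cs.any (fun c => expCodes.contains c) then "EXPERIMENTAL" else "BY_SIMILARITY" := by
  induction cs with
  | nil => rfl
  | cons c t ih =>
    by_cases h1 : expCodes.contains c = true
    · have hstep : bstep "BY_SIMILARITY" (catOf c) = "EXPERIMENTAL" := by
        rw [catOf_eq, if_pos h1]; decide
      rw [List.map_cons, List.foldl_cons, hstep, fold_from_E,
        List.any_cons, h1, Bool.true_or, if_pos rfl]
    · have h1' : expCodes.contains c = false := by revert h1; cases expCodes.contains c <;> simp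
      have hstep : bstep "BY_SIMILARITY" (catOf c) = "BY_SIMILARITY" := by
        rw [catOf_eq, if_neg h1]; split_ifs <;> decide
      rw [List.map_cons, List.foldl_cons, hstep, ih, List.any_cons, h1', Bool.false_or]

lemma fold_from_P (cs : List String) :
    (cs.map catOf).foldl bstep "PREDICTED"
      = if cs.any (fun c => expCodes.contains c) then "EXPERIMENTAL"
        else if cs.any (fun c => simCodes.contains c) then "BY_SIMILARITY"
        else "PREDICTED" := by
  induction cs with
  | nil => rfl
  | cons c t ih =>
    by_cases h1 : expCodes.contains c = true
    · have hstep : bstep "PREDICTED" (catOf c) = "EXPERIMENTAL" := by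
        rw [catOf_eq, if_pos h1]; decide
      rw [List.map_cons, List.foldl_cons, hstep, fold_from_E,
        List.any_cons, h1, Bool.true_or, if_pos rfl]
    · have h1' : expCodes.contains c = false := by revert h1; cases expCodes.contains c <;> simp
      by_cases h2 : simCodes.contains c = true
      · have hstep : bstep "PREDICTED" (catOf c) = "BY_SIMILARITY" := by
          rw [catOf_eq, if_neg h1, if_pos h2]; decide
        rw [List.map_cons, List.foldl_cons, hstep, fold_from_B,
          List.any_cons, h1', Bool.false_or, List.any_cons, h2, Bool.true_or]
        split_ifs with hA hB <;> first | rfl | exact absurd rfl hB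
      · have h2' : simCodes.contains c = false := by revert h2; cases simCodes.contains c <;> simp
        have hstep : bstep "PREDICTED" (catOf c) = "PREDICTED" := by
          rw [catOf_eq, if_neg h1, if_neg h2]; decide
        rw [List.map_cons, List.foldl_cons, hstep, ih,
          List.any_cons, h1', Bool.false_or, List.any_cons, h2', Bool.false_or]

-- testing membership on the truthy codes only is the same as on all codes ("" is in no set)
lemma any_filter_ne_empty (cs : List String) (p : String → Bool) (hp : p "" = false) :
    (cs.filter (fun c => c != "")).any p = cs.any p := by
  induction cs with
  | nil => rfl
  | cons c t ih =>
    by_cases h : c = ""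
    · subst h; simp [hp, ih]
    · simp [h, ih]

-- ===== VERDICT (by name: the statement is the Claim_ definition above) =====
theorem classify_evidence_spec : Claim_equal_classify_evidence := by
  intro feature _
  unfold Spec_classify_evidence classify_evidence classify_evidence_alt
  rcases hev : PySem.Dict.getD ⟨feature⟩ "evidences" ([] : List (List (String × String))) with _ | ⟨e, t⟩
  · simp
  · simp only [reduceCtorEq, if_false, foldA_char, List.nil_append]
    have hc : (fun ev => PySem.Dict.getD (⟨ev⟩ : PySem.Dict String String) "evidenceCode" "") = codeOf := rfl
    simp only [hc]
    have hmap : (e :: t).map (fun ev => catOf (codeOf ev)) = ((e :: t).map codeOf).map catOf := by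
      simp [List.map_map, Function.comp_def]
    rw [hmap, fold_from_P]
    rw [any_filter_ne_empty _ (fun c => expCodes.contains c) (by decide),
        any_filter_ne_empty _ (fun c => simCodes.contains c) (by decide)]
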